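-- pv_equiv track=rewrite | github.com/treytux/trey-addons | stock_deposit/wizards/stock_deposit.py | pending
-- ===== SOURCE A (Python) =====
-- def pending(lines):
--     for index, line in enumerate(lines):
--         if line[0] >= 0:
--             continue
--         qty_to_rest = line[0]
--         for to_rest in filter(lambda l: l[1] > 0, lines[:index]):
--             if to_rest[1] + qty_to_rest < 0:
--                 qty_to_rest = to_rest[1] + qty_to_rest
--                 to_rest[1] = 0
--             elif to_rest[1] + qty_to_rest >= 0:
--                 to_rest[1] += qty_to_rest
--                 qty_to_rest = 0
--                 break
--     return lines
-- ===== SOURCE B (Python) =====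
-- def pending(lines):
--     # FIFO queue of indices of lines whose second cell is still positive;
--     # each negative head consumes from the front of the queue, so every
--     # line is examined at most once instead of rescanning the whole prefix.
--     queue = []
--     for index, line in enumerate(lines):
--         qty = line[0]
--         if qty < 0:
--             while queue and qty < 0:
--                 cell = lines[queue[0]]
--                 take = min(cell[1], -qty)
--                 cell[1] -= take
--                 qty += take
--                 if cell[1] <= 0:
--                     queue.pop(0)
--         if len(line) > 1 and line[1] > 0:
--             queue.append(index)
--     return lines
-- ===== Notes on version B (the rewrite author's own statement) =====
-- stated objective: alternative
-- what changed: Instead of rescanning the whole prefix (filter over lines[:index]) for every negative line, B maintains a FIFO queue of indices of lines whose second cell is still positive and each negative head consumes from its front with take = min(cell, -qty), so every line enters and leaves the queue at most once.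
-- outside the precondition, e.g. on pending([[5, 9], [1], [-1, 0]]): A returns [[5, 8], [1], [-1, 0]], B returns [[5, 8], [1], [-1, 0]]
import Mathlib
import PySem

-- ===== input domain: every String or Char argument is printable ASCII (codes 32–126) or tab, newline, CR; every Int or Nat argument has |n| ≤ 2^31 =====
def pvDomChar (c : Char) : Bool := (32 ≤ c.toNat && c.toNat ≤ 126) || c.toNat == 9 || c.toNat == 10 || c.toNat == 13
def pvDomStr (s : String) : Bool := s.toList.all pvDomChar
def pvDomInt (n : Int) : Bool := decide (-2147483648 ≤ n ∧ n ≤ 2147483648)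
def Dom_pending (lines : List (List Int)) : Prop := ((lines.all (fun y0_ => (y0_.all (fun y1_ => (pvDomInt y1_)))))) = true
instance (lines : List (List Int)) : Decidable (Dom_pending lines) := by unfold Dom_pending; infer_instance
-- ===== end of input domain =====

-- B replaces A's rescan of the whole prefix for every negative line with a FIFO queue
-- of indices of lines whose second cell is still positive; each negative head consumes
-- from the front of the queue, so every line is examined at most once.
-- Both Pythons mutate the inner lists of `lines` in place identically and return `lines`;
-- the ports model the returned (= mutated) list.

-- ===== PORT A =====
-- in-range cell read `l[i]` (Pre_ guarantees the index is in range wherever A reads)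
def getAt (l : List Int) (i : Nat) : Int := l.getD i 0

-- cell write `l[1] = v` (lines admitted by Pre_ have length ≥ 2 wherever written)
def set1 (l : List Int) (v : Int) : List Int :=
  match l with
  | a :: _ :: r => a :: v :: r
  | _ => l

-- A's inner loop: `for to_rest in filter(lambda l: l[1] > 0, lines[:index]) …`
def offsA (qty : Int) : List (List Int) → List (List Int)
  | [] => []
  | c :: rest =>
    if getAt c 1 > 0 then
      if getAt c 1 + qty < 0 then set1 c 0 :: offsA (getAt c 1 + qty) rest
      else set1 c (getAt c 1 + qty) :: rest  -- break
    else c :: offsA qty rest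

-- A's outer loop: `processed` is lines[:index] (the mutated prefix), `remaining` the rest
def loopA (processed : List (List Int)) : List (List Int) → List (List Int)
  | [] => processed
  | l :: rest =>
    if getAt l 0 ≥ 0 then loopA (processed ++ [l]) rest
    else loopA (offsA (getAt l 0) processed ++ [l]) rest

def pending (lines : List (List Int)) : List (List Int) := loopA [] lines

-- ===== PORT B =====
-- B's `while queue and qty < 0` loop: `ls` is the whole (mutated) list,
-- `q` the queue of indices of still-positive cells; returns the new list and queue.
def consume (ls : List (List Int)) (q : List Nat) (qty : Int) :
    List (List Int) × List Nat :=
  match q with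
  | [] => (ls, [])
  | i :: rest =>
    if qty < 0 then
      let cell := (ls.getD i []).getD 1 0
      let take := min cell (-qty)
      let ls' := ls.set i ((ls.getD i []).set 1 (cell - take))
      if cell - take ≤ 0 then consume ls' rest (qty + take)  -- queue.pop(0)
      else (ls', i :: rest)  -- qty is now 0, while exits
    else (ls, i :: rest)

-- B's `for index, line in enumerate(lines)` body, folded over the index range
def stepB (st : List (List Int) × List Nat) (i : Nat) :
    List (List Int) × List Nat :=
  let line := st.1.getD i []
  let st1 := if line.getD 0 0 < 0 then consume st.1 st.2 (line.getD 0 0) else st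
  if 1 < line.length ∧ (0:Int) < line.getD 1 0 then (st1.1, st1.2 ++ [i]) else st1

def pending_alt (lines : List (List Int)) : List (List Int) :=
  ((List.range lines.length).foldl stepB (lines, [])).1

-- ===== PRECONDITION & SPEC =====
-- Pre_ excludes lists containing an empty line (A raises IndexError on line[0]) and lists
-- where a line shorter than 2 cells precedes a negative-headed line (A's offset scan may
-- reach it and raise IndexError on l[1]; whether it does depends on how far the scan gets).
def Pre_pending (lines : List (List Int)) : Prop :=
  (∀ l ∈ lines, l ≠ []) ∧
  ∀ j < lines.length, (lines.getD j []).headI < 0 → ∀ i < j, 2 ≤ (lines.getD i []).length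
instance (lines : List (List Int)) : Decidable (Pre_pending lines) := by unfold Pre_pending; infer_instance
def pvWitness_pending : List (List Int) := [[5, 9], [-3, 0], [2, 1]]
def Spec_pending (lines : List (List Int)) (out : List (List Int)) : Prop := out = pending_alt lines
instance (lines : List (List Int)) (out : List (List Int)) : Decidable (Spec_pending lines out) := by unfold Spec_pending; infer_instance

-- ===== CLAIM (what is proved, stated in full; the proofs are below) =====
def Claim_equal_pending : Prop := ∀ (lines : List (List Int)), Dom_pending lines → Pre_pending lines → Spec_pending lines (pending lines)

-- ===== LEMMAS AND PROOFS =====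

-- the queue B maintains: indices (offset by b) of cells with positive second entry
def qspec : Nat → List (List Int) → List Nat
  | _, [] => []
  | b, c :: P => if 0 < getAt c 1 then b :: qspec (b + 1) P else qspec (b + 1) P

theorem getD_app {α : Type} (F X : List α) (j : Nat) (d : α) :
    (F ++ X).getD (F.length + j) d = X.getD j d := by
  induction F with
  | nil => simp
  | cons a F ih => simpa [List.length_cons, Nat.succ_add] using ih

theorem set_app {α : Type} (F X : List α) (j : Nat) (a : α) :
    (F ++ X).set (F.length + j) a = F ++ X.set j a := by
  induction F with
  | nil => simp
  | cons b F ih => simp [List.length_cons, Nat.succ_add, ih]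

theorem set1_eq_set (l : List Int) (v : Int) : set1 l v = l.set 1 v := by
  match l with
  | [] => rfl
  | [a] => rfl
  | a :: b :: r => rfl

theorem getAt_set1 (c : List Int) (v : Int) (h : 0 < getAt c 1) :
    getAt (set1 c v) 1 = v := by
  match c with
  | [] => simp [getAt, List.getD] at h
  | [a] => simp [getAt, List.getD] at h
  | a :: b :: r => simp [getAt, set1]

theorem consume_nonneg (ls : List (List Int)) (q : List Nat) (qty : Int)
    (h : ¬ qty < 0) : consume ls q qty = (ls, q) := by
  cases q with
  | nil => rfl
  | cons i rest => simp [consume, h]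

theorem offsA_length (v : Int) (P : List (List Int)) :
    (offsA v P).length = P.length := by
  induction P generalizing v with
  | nil => rfl
  | cons c rest ih =>
    simp only [offsA]
    split_ifs <;> simp [set1_eq_set, ih]

-- consume over the positive-index queue computes exactly A's offset scan
theorem consume_spec (P F s : List (List Int)) (v : Int) (hv : v < 0) :
    consume (F ++ (P ++ s)) (qspec F.length P) v
      = (F ++ (offsA v P ++ s), qspec F.length (offsA v P)) := by
  induction P generalizing F v with
  | nil => simp [qspec, offsA, consume]
  | cons c P' ih =>
    have hnorm : F ++ ((c :: P') ++ s) = F ++ (c :: (P' ++ s)) := by simp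
    rw [hnorm]
    have hcell : ((F ++ (c :: (P' ++ s))).getD F.length []).getD 1 0 = getAt c 1 := by
      have h0 := getD_app F (c :: (P' ++ s)) 0 ([] : List Int)
      simp only [Nat.add_zero] at h0
      simp [getAt]
    have hset : ∀ w : Int, (F ++ (c :: (P' ++ s))).set F.length
        (((F ++ (c :: (P' ++ s))).getD F.length []).set 1 w)
          = F ++ ((c.set 1 w) :: (P' ++ s)) := by
      intro w
      have h0 := getD_app F (c :: (P' ++ s)) 0 ([] : List Int)
      simp only [Nat.add_zero] at h0
      rw [h0]
      have h1 := set_app F (c :: (P' ++ s)) 0 (c.set 1 w)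
      simpa using h1
    by_cases hc : 0 < getAt c 1
    · simp only [qspec, if_pos hc, consume, if_pos hv]
      rw [hcell]
      by_cases h1 : getAt c 1 + v < 0
      · -- take = cell, cell goes to 0, keep consuming
        have htake : min (getAt c 1) (-v) = getAt c 1 := by omega
        rw [htake]
        have hz : getAt c 1 - getAt c 1 ≤ 0 := by omega
        rw [if_pos hz, hset]
        have hrw : c.set 1 (getAt c 1 - getAt c 1) = set1 c 0 := by
          rw [set1_eq_set]; norm_num
        rw [hrw]
        have hcomm : v + getAt c 1 = getAt c 1 + v := by omega
        rw [hcomm]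
        have hIH := ih (F ++ [set1 c 0]) (getAt c 1 + v) (by omega)
        simp only [List.length_append, List.length_cons, List.length_nil] at hIH
        have hre : F ++ (set1 c 0 :: (P' ++ s)) = (F ++ [set1 c 0]) ++ (P' ++ s) := by simp
        rw [hre, hIH]
        have hne : ¬ 0 < getAt (set1 c 0) 1 := by rw [getAt_set1 c 0 hc]; omega
        simp [offsA, if_pos hc, if_pos h1, qspec, hne]
      · by_cases h2 : getAt c 1 + v ≤ 0
        · -- cell exactly absorbs qty: pop, then qty = 0 ends the loop
          have htake : min (getAt c 1) (-v) = getAt c 1 := by omega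
          rw [htake]
          have hz : getAt c 1 - getAt c 1 ≤ 0 := by omega
          rw [if_pos hz, hset, consume_nonneg _ _ _ (by omega)]
          have hrw : c.set 1 (getAt c 1 - getAt c 1) = set1 c (getAt c 1 + v) := by
            rw [set1_eq_set]; congr 1; omega
          rw [hrw]
          have hne : ¬ 0 < getAt (set1 c (getAt c 1 + v)) 1 := by
            rw [getAt_set1 _ _ hc]; omega
          simp [offsA, if_pos hc, if_neg h1, qspec, hne]
        · -- cell survives with positive remainder: loop exits
          have htake : min (getAt c 1) (-v) = -v := by omega
          rw [htake]
          have hz : ¬ getAt c 1 - -v ≤ 0 := by omega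
          rw [if_neg hz, hset]
          have hrw : c.set 1 (getAt c 1 - -v) = set1 c (getAt c 1 + v) := by
            rw [set1_eq_set]; congr 1; omega
          rw [hrw]
          have hp : 0 < getAt (set1 c (getAt c 1 + v)) 1 := by
            rw [getAt_set1 _ _ hc]; omega
          simp [offsA, if_pos hc, if_neg h1, qspec, hp]
    · -- nonpositive cell: not in the queue, A's scan skips it
      simp only [qspec, if_neg hc]
      have hIH := ih (F ++ [c]) v hv
      simp only [List.length_append, List.length_cons, List.length_nil] at hIH
      have hre : F ++ (c :: (P' ++ s)) = (F ++ [c]) ++ (P' ++ s) := by simp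
      rw [hre, hIH]
      simp [offsA, qspec, hc]

theorem qspec_snoc (b : Nat) (P : List (List Int)) (l : List Int) :
    qspec b (P ++ [l]) =
      qspec b P ++ (if 0 < getAt l 1 then [b + P.length] else []) := by
  induction P generalizing b with
  | nil => by_cases h : 0 < getAt l 1 <;> simp [qspec, h]
  | cons c P' ih =>
    simp only [List.cons_append, qspec, ih (b + 1)]
    split_ifs <;> simp [List.length_cons] <;> omega

theorem append_cond_iff (l : List Int) :
    (1 < l.length ∧ (0:Int) < l.getD 1 0) ↔ 0 < getAt l 1 := by
  unfold getAt
  constructor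
  · rintro ⟨_, h⟩; exact h
  · intro h
    refine ⟨?_, h⟩
    by_contra hl
    have : l.getD 1 0 = 0 := List.getD_eq_default _ _ (by omega)
    omega

-- main invariant: after processing k lines, B's state is (A's prefix ++ rest, its queue)
theorem loop_eq (R P : List (List Int)) :
    loopA P R = ((List.range' P.length R.length).foldl stepB
      (P ++ R, qspec 0 P)).1 := by
  induction R generalizing P with
  | nil => simp [loopA]
  | cons l R' ih =>
    rw [List.length_cons, List.range'_succ, List.foldl_cons]
    have hline : (P ++ l :: R').getD P.length [] = l := by
      have := getD_app P (l :: R') 0 ([] : List Int)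
      simpa using this
    simp only [stepB, hline]
    have hg0 : getAt l 0 = l.getD 0 0 := rfl
    by_cases hneg : l.getD 0 0 < 0
    · have hA : ¬ getAt l 0 ≥ 0 := by rw [hg0]; omega
      have hc := consume_spec P [] (l :: R') (l.getD 0 0) hneg
      simp only [List.nil_append, List.length_nil] at hc
      rw [if_pos hneg, hc]
      have hlen : (offsA (l.getD 0 0) P).length = P.length := offsA_length _ _
      have hA1 : loopA P (l :: R') = loopA (offsA (l.getD 0 0) P ++ [l]) R' := by
        rw [loopA, if_neg hA, hg0]
      rw [hA1, ih (offsA (l.getD 0 0) P ++ [l])]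
      have hlen2 : (offsA (l.getD 0 0) P ++ [l]).length = P.length + 1 := by
        rw [List.length_append, hlen]; rfl
      rw [hlen2]
      have happ : (offsA (l.getD 0 0) P ++ [l]) ++ R' = offsA (l.getD 0 0) P ++ (l :: R') := by
        simp
      by_cases hl : 1 < l.length ∧ (0:Int) < l.getD 1 0
      · have hpos : 0 < getAt l 1 := (append_cond_iff l).mp hl
        have hq : qspec 0 (offsA (l.getD 0 0) P ++ [l]) = qspec 0 (offsA (l.getD 0 0) P) ++ [P.length] := by
          rw [qspec_snoc, if_pos hpos, hlen]; simp
        rw [if_pos hl, happ, hq]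
      · have hpos : ¬ 0 < getAt l 1 := fun h => hl ((append_cond_iff l).mpr h)
        have hq : qspec 0 (offsA (l.getD 0 0) P ++ [l]) = qspec 0 (offsA (l.getD 0 0) P) := by
          rw [qspec_snoc, if_neg hpos]; simp
        rw [if_neg hl, happ, hq]
    · have hA : getAt l 0 ≥ 0 := by rw [hg0]; omega
      rw [if_neg hneg]
      have hA1 : loopA P (l :: R') = loopA (P ++ [l]) R' := by
        rw [loopA, if_pos hA]
      rw [hA1, ih (P ++ [l])]
      have hlen2 : (P ++ [l]).length = P.length + 1 := by simp
      rw [hlen2]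
      have happ : (P ++ [l]) ++ R' = P ++ (l :: R') := by simp
      by_cases hl : 1 < l.length ∧ (0:Int) < l.getD 1 0
      · have hpos : 0 < getAt l 1 := (append_cond_iff l).mp hl
        have hq : qspec 0 (P ++ [l]) = qspec 0 P ++ [P.length] := by
          rw [qspec_snoc, if_pos hpos]; simp
        rw [if_pos hl, happ, hq]
      · have hpos : ¬ 0 < getAt l 1 := fun h => hl ((append_cond_iff l).mpr h)
        have hq : qspec 0 (P ++ [l]) = qspec 0 P := by
          rw [qspec_snoc, if_neg hpos]; simp
        rw [if_neg hl, happ, hq]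

-- ===== VERDICT (by name: the statement is the Claim_ definition above) =====
theorem pending_spec : Claim_equal_pending := by
  intro lines _ _
  unfold Spec_pending pending pending_alt
  rw [List.range_eq_range']
  simpa [qspec] using loop_eq lines []
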